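-- pv_equiv track=rewrite | github.com/sammi-turner/Python-To-Mojo | 6kyu_codewars/fib_factorials/app.py | sum_fib
-- ===== SOURCE A (Python) =====
-- import math
--
-- def sum_fib(n):
--     if n == 0:
--         return 0
--     if n == 1:
--         return 1
--
--     fib_a = 0
--     fib_b = 1
--     sum_factorials = math.factorial(fib_a) + math.factorial(fib_b)
--
--     for i in range(2, n):
--         fib_c = fib_a + fib_b
--         sum_factorials += math.factorial(fib_c)
--         fib_a = fib_b
--         fib_b = fib_c
--
--     return sum_factorials
-- ===== SOURCE B (Python) =====
-- def sum_fib(n):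
--     if n == 0:
--         return 0
--     if n == 1:
--         return 1
--     a, b = 0, 1
--     fact = 1        # running value of b!
--     total = 2       # 0! + 1!
--     for _ in range(n - 2):
--         c = a + b
--         for m in range(b + 1, c + 1):
--             fact *= m
--         total += fact
--         a, b = b, c
--     return total
-- ===== Notes on version B (the rewrite author's own statement) =====
-- stated objective: alternative
-- what changed: B maintains a single running factorial across the Fibonacci loop, updating it by the product of the ascending range between consecutive Fibonacci values, instead of calling math.factorial from scratch for every Fibonacci number.
import Mathlib
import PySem

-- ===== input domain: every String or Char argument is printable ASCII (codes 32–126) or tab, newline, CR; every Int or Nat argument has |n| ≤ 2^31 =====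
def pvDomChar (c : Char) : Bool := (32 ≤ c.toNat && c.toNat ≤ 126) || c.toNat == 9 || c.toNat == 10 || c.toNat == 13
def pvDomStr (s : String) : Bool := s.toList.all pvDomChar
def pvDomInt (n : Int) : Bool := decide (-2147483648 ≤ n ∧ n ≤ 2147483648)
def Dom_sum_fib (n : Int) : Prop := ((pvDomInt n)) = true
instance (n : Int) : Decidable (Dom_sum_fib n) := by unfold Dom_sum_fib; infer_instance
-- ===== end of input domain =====

-- B replaces the per-iteration math.factorial call by one running factorial that is
-- advanced with the product of the range between consecutive Fibonacci values (alternative algorithm).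

-- ===== PORT A =====
-- math.factorial (arguments here are always ≥ 0)
def pyFact (m : Int) : Int := Int.ofNat (Nat.factorial m.toNat)

def sum_fib (n : Int) : Int :=
  if n == 0 then 0
  else if n == 1 then 1
  else
    let res := (PySem.List.pyRange 2 n 1).foldl
      (fun (st : Int × Int × Int) _ =>
        let c := st.1 + st.2.1
        (st.2.1, c, st.2.2 + pyFact c))
      (0, 1, pyFact 0 + pyFact 1)
    res.2.2

-- ===== PORT B =====
def sum_fib_alt (n : Int) : Int :=
  if n == 0 then 0
  else if n == 1 then 1
  else
    let res := (PySem.List.pyRange 0 (n - 2) 1).foldl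
      (fun (st : Int × Int × Int × Int) _ =>
        let c := st.1 + st.2.1
        let fact' := (PySem.List.pyRange (st.2.1 + 1) (c + 1) 1).foldl (fun f m => f * m) st.2.2.1
        (st.2.1, c, fact', st.2.2.2 + fact'))
      (0, 1, 1, 2)
    res.2.2.2

-- ===== PRECONDITION & SPEC =====
def Spec_sum_fib (n : Int) (out : Int) : Prop := out = sum_fib_alt n
instance (n : Int) (out : Int) : Decidable (Spec_sum_fib n out) := by unfold Spec_sum_fib; infer_instance

-- ===== CLAIM (what is proved, stated in full; the proofs are below) =====
def Claim_equal_sum_fib : Prop := ∀ (n : Int), Dom_sum_fib n → Spec_sum_fib n (sum_fib n)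

-- ===== LEMMAS AND PROOFS =====

theorem pyFact_succ (b : Int) (hb : 0 ≤ b) : pyFact (b + 1) = pyFact b * (b + 1) := by
  unfold pyFact
  have h1 : (b + 1).toNat = b.toNat + 1 := by omega
  rw [h1, Nat.factorial_succ]
  simp only [Int.ofNat_eq_natCast]
  push_cast
  rw [Int.toNat_of_nonneg hb]
  ring

-- product of range(b+1, b+d+1) applied to b! yields (b+d)!
theorem prod_range_fact (d : Nat) (b f : Int) (hb : 0 ≤ b) (hf : f = pyFact b) :
    (PySem.List.pyRange (b + 1) (b + d + 1) 1).foldl (fun f m => f * m) f = pyFact (b + d) := by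
  induction d generalizing f with
  | zero =>
      have : PySem.List.pyRange (b + 1) (b + 0 + 1) 1 = [] :=
        PySem.List.pyRange_one_eq_nil (by omega)
      simp [hf]
  | succ d ih =>
      push_cast
      have hsplit : PySem.List.pyRange (b + 1) (b + (d + 1) + 1) 1
          = PySem.List.pyRange (b + 1) (b + d + 1) 1 ++ [b + d + 1] := by
        have := PySem.List.pyRange_one_succ_right (a := b + 1) (b := b + d + 1) (by omega)
        convert this using 2; omega
      rw [hsplit, List.foldl_append, ih f hf]
      simp only [List.foldl_cons, List.foldl_nil]
      have h3 : b + ((d : Int) + 1) = (b + d) + 1 := by ring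
      rw [h3, pyFact_succ (b + d) (by omega)]

-- main invariant: folds of the two loop bodies agree on lists of equal length
theorem loop_eq (l1 l2 : List Int) (hlen : l1.length = l2.length)
    (a b s f : Int) (ha : 0 ≤ a) (hb : 0 ≤ b) (hf : f = pyFact b) :
    (l1.foldl (fun (st : Int × Int × Int) _ =>
        let c := st.1 + st.2.1
        (st.2.1, c, st.2.2 + pyFact c)) (a, b, s)).2.2
    = (l2.foldl (fun (st : Int × Int × Int × Int) _ =>
        let c := st.1 + st.2.1
        let fact' := (PySem.List.pyRange (st.2.1 + 1) (c + 1) 1).foldl (fun f m => f * m) st.2.2.1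
        (st.2.1, c, fact', st.2.2.2 + fact')) (a, b, f, s)).2.2.2 := by
  induction l1 generalizing l2 a b s f with
  | nil =>
      cases l2 with
      | nil => simp
      | cons y ys => simp at hlen
  | cons x xs ih =>
      cases l2 with
      | nil => simp at hlen
      | cons y ys =>
          simp only [List.foldl_cons]
          have hc : a + b = b + ((a + b - b).toNat : Int) := by omega
          have hfact : (PySem.List.pyRange (b + 1) (a + b + 1) 1).foldl (fun f m => f * m) f
              = pyFact (a + b) := by
            rw [hc]
            exact prod_range_fact (a + b - b).toNat b f hb hf
          simp only [List.length_cons] at hlen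
          have := ih ys (by omega) b (a + b) (s + pyFact (a + b)) (pyFact (a + b))
            hb (by omega) rfl
          simpa [hfact] using this

-- ===== VERDICT (by name: the statement is the Claim_ definition above) =====
theorem sum_fib_spec : Claim_equal_sum_fib := by
  unfold Claim_equal_sum_fib
  intro n _
  unfold Spec_sum_fib sum_fib sum_fib_alt
  by_cases h0 : n = 0
  · simp [h0]
  by_cases h1 : n = 1
  · simp [h1]
  have hne0 : (n == 0) = false := by simp [h0]
  have hne1 : (n == 1) = false := by simp [h1]
  simp only [hne0, hne1, Bool.false_eq_true, if_false]
  have hlen : (PySem.List.pyRange 2 n 1).length = (PySem.List.pyRange 0 (n - 2) 1).length := by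
    rw [PySem.List.length_pyRange_one, PySem.List.length_pyRange_one]
    omega
  have := loop_eq (PySem.List.pyRange 2 n 1) (PySem.List.pyRange 0 (n - 2) 1) hlen
    0 1 (pyFact 0 + pyFact 1) 1 (by omega) (by omega) (by decide)
  simpa [pyFact] using this
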